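-- pv_equiv track=rewrite | github.com/hubertau/DPhil_Studies | 2022-10-Study_B/src/newsanalysis/data_utils/preprocess.py | combine_person_tags
-- ===== SOURCE A (Python) =====
-- def combine_person_tags(indexed_iob2_sequence, iper_id = 0):
--     entities = []
--     current_entity_tokens = []
--     for index, token, tag in indexed_iob2_sequence:
--         # If token starts with '_' or tag is not 'I-PER', add current_entity_tokens to entities
--         if token.startswith('_') or tag != iper_id:
--             if current_entity_tokens:
--                 entities.append(''.join([t.lstrip('_') for t in current_entity_tokens]))
--                 current_entity_tokens = []
--         # Add the token to current_entity_tokens (removing the '_' if it's there)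
--         current_entity_tokens.append(token.lstrip('_'))
--     # Don't forget to add the last entity to the list
--     if current_entity_tokens:
--         entities.append(''.join([t for t in current_entity_tokens]))
--     entities = [i.replace('▁', ' ').replace("_", " ").strip() for i in entities]
--     return entities
-- ===== SOURCE B (Python) =====
-- def combine_person_tags(indexed_iob2_sequence, iper_id=0):
--     # Stage 1: label every token with a group id; a boundary token opens a new group.
--     gid = 0
--     labeled = []
--     for index, token, tag in indexed_iob2_sequence:
--         if token.startswith('_') or tag != iper_id:
--             gid += 1
--         labeled.append((gid, token.lstrip('_')))
--     # Stage 2: bucket the stripped tokens by group id (ids arrive in nondecreasing order).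
--     groups = {}
--     for g, t in labeled:
--         groups.setdefault(g, []).append(t)
--     return [''.join(groups[g]).replace('▁', ' ').replace('_', ' ').strip() for g in groups]
-- ===== Notes on version B (the rewrite author's own statement) =====
-- stated objective: alternative
-- what changed: Replaces A's flush-on-boundary entity buffer with a two-stage pass: first label every token with a group id (incremented at each boundary), then bucket the lstripped tokens by id in a dict and join each bucket.
import Mathlib
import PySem

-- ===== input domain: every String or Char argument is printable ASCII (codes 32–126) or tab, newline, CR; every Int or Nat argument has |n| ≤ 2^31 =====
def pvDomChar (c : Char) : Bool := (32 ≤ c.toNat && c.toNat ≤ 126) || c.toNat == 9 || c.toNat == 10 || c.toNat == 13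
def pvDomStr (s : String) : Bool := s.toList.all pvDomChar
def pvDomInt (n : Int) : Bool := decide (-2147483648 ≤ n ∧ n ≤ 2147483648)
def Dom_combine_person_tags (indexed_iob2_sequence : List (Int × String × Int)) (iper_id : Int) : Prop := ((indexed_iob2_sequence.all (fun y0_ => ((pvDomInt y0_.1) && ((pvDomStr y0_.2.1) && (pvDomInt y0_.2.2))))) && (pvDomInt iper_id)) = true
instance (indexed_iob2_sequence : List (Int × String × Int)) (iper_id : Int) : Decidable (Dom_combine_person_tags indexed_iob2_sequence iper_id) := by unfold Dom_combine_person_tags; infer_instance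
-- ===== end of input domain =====

-- B replaces A's inline flush-on-boundary buffer with a two-stage pass (label each token with a
-- group id, then bucket by id); objective: alternative decomposition, same asymptotic cost.

-- shared Python snippets of both sources:
-- t.lstrip('_') — hand port, exact: drops every leading '_' character
def pvLstripU (s : String) : String := String.ofList (s.toList.dropWhile (fun c => c == '_'))
-- i.replace('▁', ' ').replace('_', ' ').strip()
def pvPost (e : String) : String :=
  PySem.Str.strip (PySem.Str.replace (PySem.Str.replace e "▁" " " ) "_" " ")
-- token.startswith('_') or tag != iper_id
def pvBoundary (iper_id : Int) (itt : Int × String × Int) : Bool :=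
  PySem.Str.startswith itt.2.1 "_" || itt.2.2 != iper_id

-- ===== PORT A =====
-- loop body of A: flush the buffer on a boundary, then append the lstripped token
def pvStepA (iper_id : Int) (st : List String × List String) (itt : Int × String × Int) :
    List String × List String :=
  let flushed :=
    if pvBoundary iper_id itt then
      (if st.2 ≠ [] then
        (st.1 ++ [PySem.Str.join "" (st.2.map (fun t => pvLstripU t))], ([] : List String))
      else st)
    else st
  (flushed.1, flushed.2 ++ [pvLstripU itt.2.1])

def combine_person_tags (indexed_iob2_sequence : List (Int × String × Int)) (iper_id : Int) :
    List String :=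
  let st := indexed_iob2_sequence.foldl (pvStepA iper_id) ([], [])
  (st.1 ++ (if st.2 ≠ [] then [PySem.Str.join "" (st.2.map (fun t => t))] else [])).map
    (fun i => pvPost i)

-- ===== PORT B =====
-- stage-1 loop body: bump the group id on a boundary, append the labelled stripped token
def pvStep1 (iper_id : Int) (st : Int × List (Int × String)) (itt : Int × String × Int) :
    Int × List (Int × String) :=
  let gid := if pvBoundary iper_id itt then st.1 + 1 else st.1
  (gid, st.2 ++ [(gid, pvLstripU itt.2.1)])

-- stage-2 loop body: groups.setdefault(g, []).append(t)
def pvStep2 (d : PySem.Dict Int (List String)) (p : Int × String) : PySem.Dict Int (List String) :=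
  d.modify p.1 [] (fun l => l ++ [p.2])

def combine_person_tags_alt (indexed_iob2_sequence : List (Int × String × Int)) (iper_id : Int) :
    List String :=
  let labeled := (indexed_iob2_sequence.foldl (pvStep1 iper_id) (0, [])).2
  let groups := labeled.foldl pvStep2 PySem.Dict.empty
  groups.keys.map (fun g => pvPost (PySem.Str.join "" (groups.getD g [])))

-- ===== PRECONDITION & SPEC =====
def Spec_combine_person_tags (indexed_iob2_sequence : List (Int × String × Int)) (iper_id : Int) (out : List String) : Prop := out = combine_person_tags_alt indexed_iob2_sequence iper_id
instance (indexed_iob2_sequence : List (Int × String × Int)) (iper_id : Int) (out : List String) : Decidable (Spec_combine_person_tags indexed_iob2_sequence iper_id out) := by unfold Spec_combine_person_tags; infer_instance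

-- ===== CLAIM (what is proved, stated in full; the proofs are below) =====
def Claim_equal_combine_person_tags : Prop := ∀ (indexed_iob2_sequence : List (Int × String × Int)) (iper_id : Int), Dom_combine_person_tags indexed_iob2_sequence iper_id → Spec_combine_person_tags indexed_iob2_sequence iper_id (combine_person_tags indexed_iob2_sequence iper_id)

-- ===== LEMMAS AND PROOFS =====

-- the labelled token list stage 1 produces from a starting group id, as a structural recursion
def pvLab (iper_id : Int) : Int → List (Int × String × Int) → List (Int × String)
  | _, [] => []
  | gid, itt :: r =>
    let gid' := if pvBoundary iper_id itt then gid + 1 else gid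
    (gid', pvLstripU itt.2.1) :: pvLab iper_id gid' r

lemma pvStage1_eq (iper_id : Int) :
    ∀ (xs : List (Int × String × Int)) (gid : Int) (acc : List (Int × String)),
      (xs.foldl (pvStep1 iper_id) (gid, acc)).2 = acc ++ pvLab iper_id gid xs := by
  intro xs
  induction xs with
  | nil => intro gid acc; simp [pvLab]
  | cons itt r ih =>
    intro gid acc
    simp only [List.foldl_cons, pvStep1, pvLab]
    by_cases hb : pvBoundary iper_id itt
    · simp [hb, ih]
    · simp [hb, ih]

-- pvLstripU is idempotent
lemma pvLstripU_idem (s : String) : pvLstripU (pvLstripU s) = pvLstripU s := by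
  unfold pvLstripU
  simp [List.dropWhile_idempotent]

-- the invariant tying A's (entities, buffer) state to B's (group id, dict) state
def pvInv (ents cur : List String) (gid : Int) (d : PySem.Dict Int (List String)) : Prop :=
  (cur = [] ∧ ents = [] ∧ d = PySem.Dict.empty) ∨
  (cur ≠ [] ∧ (∀ s ∈ cur, pvLstripU s = s) ∧ ∃ pre,
    d.items = pre ++ [(gid, cur)] ∧
    ents = pre.map (fun p => PySem.Str.join "" p.2) ∧
    ((pre ++ [(gid, cur)]).map (fun p => p.1)).Pairwise (· < ·))

lemma pvInv_step (iper_id : Int) (ents cur : List String) (gid : Int)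
    (d : PySem.Dict Int (List String)) (itt : Int × String × Int)
    (h : pvInv ents cur gid d) :
    pvInv (pvStepA iper_id (ents, cur) itt).1 (pvStepA iper_id (ents, cur) itt).2
      (if pvBoundary iper_id itt then gid + 1 else gid)
      (pvStep2 d (if pvBoundary iper_id itt then gid + 1 else gid, pvLstripU itt.2.1)) := by
  rcases h with ⟨hc, he, hd⟩ | ⟨hne, hfix, pre, hitems, hents, hpair⟩
  · -- empty start: whichever branch A takes, nothing is flushed and a first group opens
    subst hc; subst he; subst hd
    by_cases hb : pvBoundary iper_id itt <;>
    [ (have hA : pvStepA iper_id ([], []) itt = ([], [pvLstripU itt.2.1]) := by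
        simp [pvStepA, hb];
       rw [hA, if_pos hb]);
      (have hA : pvStepA iper_id ([], []) itt = ([], [pvLstripU itt.2.1]) := by
        simp [pvStepA, hb];
       rw [hA, if_neg hb]) ] <;>
    · refine Or.inr ⟨by simp, ?_, [], ?_, by simp, by simp⟩
      · intro s hs
        simp only [List.mem_singleton] at hs
        rw [hs]; exact pvLstripU_idem _
      · simp only [pvStep2, PySem.Dict.modify, PySem.Dict.getD_empty,
          PySem.Dict.items_insert_of_not_contains _ _ (PySem.Dict.contains_empty _),
          List.nil_append]
        rfl
  · have hkeys : d.keys = pre.map (fun p => p.1) ++ [gid] := by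
      simp only [PySem.Dict.keys, hitems, List.map_append, List.map_cons, List.map_nil]
    have hpair' : List.Pairwise (· < ·) (pre.map (fun p => p.1) ++ [gid]) := by
      simpa using hpair
    have hlt : ∀ p ∈ pre, p.1 < gid := by
      intro p hp
      have := (List.pairwise_append.mp hpair').2.2
      exact this _ (List.mem_map_of_mem hp) gid (List.mem_singleton.mpr rfl)
    have hnd : d.keys.Nodup := by
      rw [hkeys]; exact hpair'.imp (fun h => ne_of_lt h)
    by_cases hb : pvBoundary iper_id itt
    · -- boundary: A flushes the buffer, B opens the fresh key gid+1
      have hnc : d.contains (gid + 1) = false := by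
        rw [← Bool.not_eq_true]
        intro hcon
        have hmem := (PySem.Dict.contains_iff_mem_keys d (gid + 1)).mp hcon
        rw [hkeys] at hmem
        rcases List.mem_append.mp hmem with hmem | hmem
        · rcases List.mem_map.mp hmem with ⟨p, hp, hpe⟩
          have := hlt p hp; omega
        · have : gid + 1 = gid := by simpa using hmem
          omega
      have hcurmap : cur.map (fun t => pvLstripU t) = cur := by
        calc cur.map (fun t => pvLstripU t) = cur.map id := List.map_congr_left hfix
        _ = cur := List.map_id cur
      have hA : pvStepA iper_id (ents, cur) itt
          = (ents ++ [PySem.Str.join "" cur], [pvLstripU itt.2.1]) := by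
        simp [pvStepA, hb, hne, hcurmap]
      rw [hA, if_pos hb]
      have hditems : (pvStep2 d (gid + 1, pvLstripU itt.2.1)).items
          = (pre ++ [(gid, cur)]) ++ [(gid + 1, [pvLstripU itt.2.1])] := by
        simp [pvStep2, PySem.Dict.modify,
          PySem.Dict.getD_of_not_contains d ([] : List String) hnc,
          PySem.Dict.items_insert_of_not_contains _ _ hnc, hitems]
      refine Or.inr ⟨by simp, ?_, pre ++ [(gid, cur)], ?_, by simp [hents], ?_⟩
      · intro s hs
        simp only [List.mem_singleton] at hs
        rw [hs]; exact pvLstripU_idem _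
      · rw [hditems]
      · simp only [List.map_append, List.map_cons, List.map_nil, List.append_assoc]
        rw [List.pairwise_append]
        refine ⟨(List.pairwise_append.mp hpair').1, ?_, ?_⟩
        · refine List.Pairwise.cons ?_ (List.pairwise_singleton _ _)
          intro b hb
          have hbe : b = gid + 1 := by simpa using hb
          omega
        intro a ha b hb'
        simp only [List.mem_append, List.mem_singleton] at hb'
        have ha' : a < gid := by
          rcases List.mem_map.mp ha with ⟨p, hp, hpe⟩
          have := hlt p hp; omega
        rcases hb' with hb' | hb' <;> omega
    · -- no boundary: A extends the buffer, B appends to the value at the last key gid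
      have hmemit : (gid, cur) ∈ d.items := by rw [hitems]; simp
      have hcon : d.contains gid = true := by
        apply (PySem.Dict.contains_iff_mem_keys d gid).mpr
        rw [hkeys]; simp
      have hget : d.getD gid [] = cur := PySem.Dict.getD_of_mem_items d hmemit hnd []
      have hA : pvStepA iper_id (ents, cur) itt = (ents, cur ++ [pvLstripU itt.2.1]) := by
        simp [pvStepA, hb]
      rw [hA, if_neg hb]
      have hditems : (pvStep2 d (gid, pvLstripU itt.2.1)).items
          = pre ++ [(gid, cur ++ [pvLstripU itt.2.1])] := by
        simp only [pvStep2, PySem.Dict.modify, hget,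
          PySem.Dict.items_insert_of_contains _ _ hcon, hitems, List.map_append,
          List.map_cons, List.map_nil]
        congr 1
        · refine (List.map_congr_left (fun p hp => ?_)).trans (List.map_id pre)
          have hne' : (p.1 == gid) = false := by
            have := hlt p hp
            simp only [beq_eq_false_iff_ne]; omega
          simp [hne']
        · simp
      refine Or.inr ⟨by simp, ?_, pre, by rw [hditems], hents, ?_⟩
      · intro s hs
        rcases List.mem_append.mp hs with hs | hs
        · exact hfix s hs
        · simp only [List.mem_singleton] at hs
          rw [hs]; exact pvLstripU_idem _
      · simpa using hpair'

lemma pvMain (iper_id : Int) :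
    ∀ (xs : List (Int × String × Int)) (ents cur : List String) (gid : Int)
      (d : PySem.Dict Int (List String)), pvInv ents cur gid d →
      ∃ gid', pvInv (xs.foldl (pvStepA iper_id) (ents, cur)).1
        (xs.foldl (pvStepA iper_id) (ents, cur)).2 gid'
        ((pvLab iper_id gid xs).foldl pvStep2 d) := by
  intro xs
  induction xs with
  | nil => intro ents cur gid d h; exact ⟨gid, by simpa [pvLab] using h⟩
  | cons itt r ih =>
    intro ents cur gid d h
    have hstep := pvInv_step iper_id ents cur gid d itt h
    simp only [List.foldl_cons, pvLab]
    exact ih _ _ _ _ hstep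

lemma pvConclude (ents cur : List String) (gid : Int) (d : PySem.Dict Int (List String))
    (h : pvInv ents cur gid d) :
    (ents ++ (if cur ≠ [] then [PySem.Str.join "" (cur.map (fun t => t))] else [])).map
        (fun i => pvPost i)
      = d.keys.map (fun g => pvPost (PySem.Str.join "" (d.getD g []))) := by
  rcases h with ⟨hc, he, hd⟩ | ⟨hne, hfix, pre, hitems, hents, hpair⟩
  · subst hc; subst he; subst hd; simp
  · have hkeys : d.keys = (pre ++ [(gid, cur)]).map (fun p => p.1) := by
      simp only [PySem.Dict.keys, hitems]
    have hnd : d.keys.Nodup := by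
      rw [hkeys]; exact hpair.imp (fun h => ne_of_lt h)
    have hrhs : d.keys.map (fun g => pvPost (PySem.Str.join "" (d.getD g [])))
        = d.items.map (fun p => pvPost (PySem.Str.join "" p.2)) := by
      rw [PySem.Dict.items_eq_map_keys d hnd ([] : List String), List.map_map]
      rfl
    rw [hrhs, hitems, if_pos hne, hents]
    simp [List.map_map]

-- ===== VERDICT (by name: the statement is the Claim_ definition above) =====
theorem combine_person_tags_spec : Claim_equal_combine_person_tags := by
  intro xs iper_id _
  unfold Spec_combine_person_tags combine_person_tags combine_person_tags_alt
  rw [pvStage1_eq iper_id xs 0 []]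
  simp only [List.nil_append]
  obtain ⟨gid', hinv⟩ := pvMain iper_id xs [] [] 0 PySem.Dict.empty (Or.inl ⟨rfl, rfl, rfl⟩)
  exact pvConclude _ _ _ _ hinv
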